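-- pv_equiv track=rewrite | github.com/tornadohood/kenphoton | tools/standalone/wfs_checks.py | get_table_info
-- ===== SOURCE A (Python) =====
-- import collections
--
-- def get_table_info(list_of_lists):
--     # type: (List[List[str]]) -> Dict[int, int]
--     """ Create table_info for making separators.
--     Arguments:
--         list_of_lists (list): Any list of lists that can be stringified.
--
--     Returns:
--         table_info (OrderedDict): Index and max column length for each item
--                                   in my list of lists - i.e. list[:][0] has a
--                                   max length of 5 characters for all lists.
--     """
--     table_info = collections.OrderedDict()  # type: collections.OrderedDict
--     for list_item in list_of_lists:
--         for index, col in enumerate(list_item):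
--             max_len = table_info.get(index, 0)
--             # Make sure whatever it is, we try to stringify it
--             # for length testing.  Formats below will take care
--             # of making it a string in the end.
--             str_col = str(col)
--             if len(str_col) > max_len:
--                 table_info[index] = len(str_col)
--     return dict(table_info)
-- ===== SOURCE B (Python) =====
-- import collections
--
-- def get_table_info(list_of_lists):
--     # Two-pass: group stringified lengths by column index, then reduce each group with max.
--     # Only positive lengths are collected: a zero-width value can never raise a maximum
--     # that defaults to 0, so it contributes nothing (and creates no column entry).
--     groups = collections.defaultdict(list)
--     for row in list_of_lists:
--         for index, col in enumerate(row):
--             length = len(str(col))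
--             if length:
--                 groups[index].append(length)
--     return {index: max(lengths) for index, lengths in groups.items()}
-- ===== Notes on version B (the rewrite author's own statement) =====
-- stated objective: alternative
-- what changed: A maintains one dict whose running max is updated in place inside the scan; B makes two distinct passes: first group every stringified length into per-column-index lists (a defaultdict; only positive lengths are collected, since a zero-width value cannot raise a maximum that defaults to 0), then build the result with a dict comprehension taking max of each group.
import Mathlib
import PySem

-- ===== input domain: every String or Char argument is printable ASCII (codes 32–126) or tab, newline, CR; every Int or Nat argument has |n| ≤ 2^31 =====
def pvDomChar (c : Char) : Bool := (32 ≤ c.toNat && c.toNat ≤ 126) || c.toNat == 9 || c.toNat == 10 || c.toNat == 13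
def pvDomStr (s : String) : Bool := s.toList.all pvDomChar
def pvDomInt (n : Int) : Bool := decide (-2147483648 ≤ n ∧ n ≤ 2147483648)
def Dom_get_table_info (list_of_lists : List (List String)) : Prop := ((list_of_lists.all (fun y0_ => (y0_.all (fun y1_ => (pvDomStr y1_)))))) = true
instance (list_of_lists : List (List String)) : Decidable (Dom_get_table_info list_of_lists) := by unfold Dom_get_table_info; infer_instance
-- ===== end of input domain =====

-- B replaces A's single dict-with-running-max loop by a two-pass collect-then-reduce:
-- group the (positive) lengths per column index, then map each group to its max (alternative decomposition, same cost).

-- ===== PORT A =====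
-- literal port of A: one dict, running max updated in place
def get_table_info (list_of_lists : List (List String)) : List (Int × Int) :=
  (list_of_lists.foldl
    (fun table_info list_item =>
      (PySem.List.enumerate list_item 0).foldl
        (fun table_info p =>
          let max_len := table_info.getD p.1 0
          let str_col := p.2          -- str(col): col is already a string
          if PySem.Str.len str_col > max_len then
            table_info.insert p.1 (PySem.Str.len str_col)
          else table_info)
        table_info)
    PySem.Dict.empty).items

-- ===== PORT B =====
-- max(lengths) of a group; the none branch is unreachable (groups are never empty)
def pymaxInt (ls : List Int) : Int :=
  match PySem.List.max? ls (fun x => x) with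
  | some m => m
  | none => 0

-- literal port of Source B: pass 1 groups positive lengths per index ('if length:'), pass 2 maps each group to its max
def get_table_info_alt (list_of_lists : List (List String)) : List (Int × Int) :=
  let groups : PySem.Dict Int (List Int) :=
    list_of_lists.foldl
      (fun groups row =>
        (PySem.List.enumerate row 0).foldl
          (fun groups p =>
            let length := PySem.Str.len p.2
            if length ≠ 0 then groups.modify p.1 [] (fun ls => ls ++ [length])
            else groups)
          groups)
      PySem.Dict.empty
  groups.items.map (fun q => (q.1, pymaxInt q.2))

-- ===== PRECONDITION & SPEC =====
def Spec_get_table_info (list_of_lists : List (List String)) (out : List (Int × Int)) : Prop := out = get_table_info_alt list_of_lists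
instance (list_of_lists : List (List String)) (out : List (Int × Int)) : Decidable (Spec_get_table_info list_of_lists out) := by unfold Spec_get_table_info; infer_instance

-- ===== CLAIM (what is proved, stated in full; the proofs are below) =====
def Claim_equal_get_table_info : Prop := ∀ (list_of_lists : List (List String)), Dom_get_table_info list_of_lists → Spec_get_table_info list_of_lists (get_table_info list_of_lists)

-- ===== LEMMAS AND PROOFS =====

-- the reduction B applies to each group
def pvRed (q : Int × List Int) : Int × Int := (q.1, pymaxInt q.2)

lemma pymaxInt_append (ls : List Int) (L : Int) (hL : 0 ≤ L) :
    pymaxInt (ls ++ [L]) = max (pymaxInt ls) L := by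
  cases ls with
  | nil =>
      have h0 : pymaxInt ([] : List Int) = 0 := rfl
      have h1 : pymaxInt [L] = L := by simp [pymaxInt, PySem.List.max?_id_cons]
      simp only [List.nil_append, h0, h1]
      omega
  | cons x t =>
      simp [pymaxInt, PySem.List.max?_id_cons, List.foldl_append]

lemma len_nonneg (s : String) : 0 ≤ PySem.Str.len s := by
  have := PySem.Str.len_eq s
  omega

-- the loop invariant tying A's dict to B's groups
def pvInv (t : PySem.Dict Int Int) (g : PySem.Dict Int (List Int)) : Prop :=
  t.items = g.items.map pvRed ∧ g.keys.Nodup ∧ ∀ q ∈ g.items, 1 ≤ pymaxInt q.2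

-- one (index, string) step preserves the invariant
lemma step_inv (t : PySem.Dict Int Int) (g : PySem.Dict Int (List Int))
    (k : Int) (s : String) (hinv : pvInv t g) :
    pvInv (if PySem.Str.len s > t.getD k 0 then t.insert k (PySem.Str.len s) else t)
      (if PySem.Str.len s ≠ 0 then g.insert k (g.getD k [] ++ [PySem.Str.len s]) else g) := by
  obtain ⟨ht, hnd, hpos⟩ := hinv
  set L := PySem.Str.len s with hLdef
  have hL0 : 0 ≤ L := len_nonneg s
  have hkeys : t.keys = g.keys := by
    show t.items.map Prod.fst = g.items.map Prod.fst
    rw [ht, List.map_map]; rfl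
  have htnd : t.keys.Nodup := by rw [hkeys]; exact hnd
  have hcont : t.contains k = g.contains k := by
    rw [PySem.Dict.contains_eq_decide_mem_keys, PySem.Dict.contains_eq_decide_mem_keys, hkeys]
  -- the current value A holds at k is nonnegative (0 if absent, a group max ≥ 1 if present)
  have htget0 : 0 ≤ t.getD k 0 := by
    by_cases hc : g.contains k = true
    · obtain ⟨ls, hget⟩ : ∃ ls, g.get? k = some ls := by
        have := PySem.Dict.contains_eq_isSome_get? (d := g) (k := k)
        rw [hc] at this
        exact Option.isSome_iff_exists.mp this.symm
      have hmemt : (k, pymaxInt ls) ∈ t.items := by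
        rw [ht]; exact List.mem_map.mpr ⟨(k, ls), PySem.Dict.mem_items_of_get?_eq_some _ hget, rfl⟩
      rw [PySem.Dict.getD_of_mem_items _ hmemt htnd 0]
      have h2 : 1 ≤ pymaxInt ls := hpos (k, ls) (PySem.Dict.mem_items_of_get?_eq_some _ hget)
      omega
    · have htc : t.contains k = false := by rw [hcont]; simpa using hc
      rw [PySem.Dict.getD_of_not_contains _ _ htc]
  by_cases hz : L ≠ 0
  · -- a positive length: both sides move
    have hL1 : 1 ≤ L := by omega
    rw [if_pos hz]
    refine ⟨?_, PySem.Dict.nodup_keys_insert _ _ _ hnd, ?_⟩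
    · -- items relation
      by_cases hc : g.contains k = true
      · obtain ⟨ls, hget⟩ : ∃ ls, g.get? k = some ls := by
          have := PySem.Dict.contains_eq_isSome_get? (d := g) (k := k)
          rw [hc] at this
          exact Option.isSome_iff_exists.mp this.symm
        have hgetD : g.getD k [] = ls := PySem.Dict.getD_of_get?_eq_some _ _ hget
        have hmemg : (k, ls) ∈ g.items := PySem.Dict.mem_items_of_get?_eq_some _ hget
        have hmemt : (k, pymaxInt ls) ∈ t.items := by
          rw [ht]; exact List.mem_map.mpr ⟨(k, ls), hmemg, rfl⟩
        have htget : t.getD k 0 = pymaxInt ls := PySem.Dict.getD_of_mem_items _ hmemt htnd 0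
        have hB := PySem.Dict.items_insert_of_contains (d := g)
          (k := k) (v := g.getD k [] ++ [L]) hc
        have htc : t.contains k = true := by rw [hcont]; exact hc
        have hval : pymaxInt (ls ++ [L]) = max (pymaxInt ls) L := pymaxInt_append ls L hL0
        by_cases hcmp : L > t.getD k 0
        · rw [if_pos hcmp]
          rw [PySem.Dict.items_insert_of_contains (d := t) (k := k) (v := L) htc]
          rw [hB, List.map_map, ht, List.map_map]
          apply List.map_congr_left
          intro p hp
          by_cases hpk : p.1 = k
          · simp only [Function.comp, pvRed, hpk, hgetD, beq_self_eq_true, if_true]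
            rw [hval]
            rw [htget] at hcmp
            rw [max_eq_right (le_of_lt hcmp)]
          · simp [Function.comp, pvRed, hpk]
        · rw [if_neg hcmp]
          rw [ht, hB, List.map_map]
          apply List.map_congr_left
          intro p hp
          by_cases hpk : p.1 = k
          · have hpget : g.get? p.1 = some p.2 := by
              have : (p.1, p.2) ∈ g.items := by simpa using hp
              exact PySem.Dict.get?_of_mem_items _ this hnd
            rw [hpk, hget] at hpget
            have hpeq : p = (k, ls) := by
              obtain ⟨p1, p2⟩ := p
              simp_all
            simp only [Function.comp, pvRed, hgetD, beq_self_eq_true, if_true, hpeq]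
            rw [hval]
            rw [htget] at hcmp
            rw [max_eq_left (by omega)]
          · simp [Function.comp, pvRed, hpk]
      · -- fresh key
        have hc' : g.contains k = false := by simpa using hc
        have htc : t.contains k = false := by rw [hcont]; exact hc'
        have htget : t.getD k 0 = 0 := PySem.Dict.getD_of_not_contains _ _ htc
        have hgget : g.getD k [] = [] := PySem.Dict.getD_of_not_contains _ _ hc'
        rw [if_pos (by omega)]
        rw [PySem.Dict.items_insert_of_not_contains (d := t) (k := k) (v := L) htc,
            PySem.Dict.items_insert_of_not_contains (d := g)
              (k := k) (v := g.getD k [] ++ [L]) hc']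
        rw [List.map_append, ht, hgget]
        have hone : pvRed (k, [] ++ [L]) = (k, L) := by
          simp [pvRed, pymaxInt, PySem.List.max?_id_cons]
        simp only [List.map_cons, List.map_nil, hone]
    · -- positivity of the new groups
      intro q hq
      rcases (PySem.Dict.mem_items_insert _ _ _ _).mp hq with hq1 | ⟨hq2, _⟩
      · subst hq1
        rw [pymaxInt_append _ _ hL0]
        have h3 := le_max_right (pymaxInt (g.getD k [])) L
        omega
      · exact hpos q hq2
  · -- a zero length: both sides stand still
    rw [if_neg hz]
    have : ¬ L > t.getD k 0 := by omega
    rw [if_neg this]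
    exact ⟨ht, hnd, hpos⟩

-- the whole (index, string) stream, by induction, from any invariant-related pair of dicts
lemma fold_pairs (ps : List (Int × String)) :
    ∀ (t : PySem.Dict Int Int) (g : PySem.Dict Int (List Int)),
    pvInv t g →
    pvInv
      (ps.foldl (fun table_info p =>
          let max_len := table_info.getD p.1 0
          let str_col := p.2
          if PySem.Str.len str_col > max_len then
            table_info.insert p.1 (PySem.Str.len str_col)
          else table_info) t)
      (ps.foldl (fun groups p =>
          let length := PySem.Str.len p.2
          if length ≠ 0 then groups.modify p.1 [] (fun ls => ls ++ [length])
          else groups) g) := by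
  induction ps with
  | nil => intro t g h; exact h
  | cons p rest ih =>
      intro t g h
      simp only [List.foldl_cons]
      exact ih _ _ (step_inv t g p.1 p.2 h)

-- nested row loop = one loop over the flattened (index, value) stream
lemma foldl_foldl_flatMap {α β γ : Type} (l : List α) (e : α → List β)
    (f : γ → β → γ) (init : γ) :
    l.foldl (fun acc row => (e row).foldl f acc) init = (l.flatMap e).foldl f init := by
  induction l generalizing init with
  | nil => rfl
  | cons r tl ih => simp [List.flatMap_cons, List.foldl_append, ih]

-- ===== VERDICT (by name: the statement is the Claim_ definition above) =====
theorem get_table_info_spec : Claim_equal_get_table_info := by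
  intro l _
  unfold Spec_get_table_info get_table_info get_table_info_alt
  rw [foldl_foldl_flatMap, foldl_foldl_flatMap]
  exact (fold_pairs (l.flatMap fun row => PySem.List.enumerate row 0)
    PySem.Dict.empty PySem.Dict.empty ⟨rfl, PySem.Dict.nodup_keys_empty,
    by intro q hq; simp [show (PySem.Dict.empty : PySem.Dict Int (List Int)).items = [] from rfl] at hq⟩).1
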